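-- pv_equiv track=rewrite | github.com/minecrafter/minecraft-utils | minecraftutils/bungeecord.py | _check_package_name
-- ===== SOURCE A (Python) =====
-- def _check_package_name(package):
--     tree = package.split('.')
--
--     if len(tree) == 0:
--         return False
--
--     for node in tree:
--         if not node.replace("_", "").isalpha():
--             return False
--
--     return True
-- ===== SOURCE B (Python) =====
-- def _check_package_name(package):
--     # Single streaming pass: no split, no intermediate list.
--     has_alpha = False
--     for c in package:
--         if c == '_':
--             continue
--         elif c.isalpha():
--             has_alpha = True
--         elif c == '.':
--             if not has_alpha:
--                 return False
--             has_alpha = False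
--         else:
--             return False
--     return has_alpha
-- ===== Notes on version B (the rewrite author's own statement) =====
-- stated objective: alternative
-- what changed: Replaces splitting into components plus per-component replace/isalpha checks with a single character-by-character scan that tracks whether the current segment has seen a letter.
import Mathlib
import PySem

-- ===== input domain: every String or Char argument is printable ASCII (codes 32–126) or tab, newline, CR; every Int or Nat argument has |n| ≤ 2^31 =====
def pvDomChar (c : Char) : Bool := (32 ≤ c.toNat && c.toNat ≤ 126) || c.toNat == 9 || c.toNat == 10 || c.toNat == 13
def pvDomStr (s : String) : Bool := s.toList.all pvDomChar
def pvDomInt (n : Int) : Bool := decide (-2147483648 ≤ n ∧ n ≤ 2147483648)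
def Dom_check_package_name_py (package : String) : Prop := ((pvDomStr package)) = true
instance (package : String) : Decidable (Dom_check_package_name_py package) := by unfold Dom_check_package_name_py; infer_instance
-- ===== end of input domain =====

-- B replaces split-then-validate with a single character scan; objective: alternative decomposition, same cost.

-- ===== PORT A =====
-- node.replace("_", "").isalpha()
def pyNodeOk (node : List Char) : Bool :=
  PySem.Chars.strIsalpha (PySem.Chars.replace node ['_'] [])

def check_package_name_py (package : String) : Bool :=
  let tree := PySem.Chars.splitOn package.toList ['.']
  if tree.length == 0 then false
  else tree.all pyNodeOk   -- the for-loop with early 'return False', then 'return True'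

-- ===== PORT B =====
-- the for-loop over characters with accumulator has_alpha and early returns
def scanPkg : List Char → Bool → Bool
  | [], hasAlpha => hasAlpha
  | c :: rest, hasAlpha =>
    if c == '_' then scanPkg rest hasAlpha
    else if PySem.Chars.isalpha c then scanPkg rest true
    else if c == '.' then (if hasAlpha then scanPkg rest false else false)
    else false

def check_package_name_py_alt (package : String) : Bool :=
  scanPkg package.toList false

-- ===== PRECONDITION & SPEC =====
def Spec_check_package_name_py (package : String) (out : Bool) : Prop := out = check_package_name_py_alt package
instance (package : String) (out : Bool) : Decidable (Spec_check_package_name_py package out) := by unfold Spec_check_package_name_py; infer_instance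

-- ===== CLAIM (what is proved, stated in full; the proofs are below) =====
def Claim_equal_check_package_name_py : Prop := ∀ (package : String), Dom_check_package_name_py package → Spec_check_package_name_py package (check_package_name_py package)

-- ===== LEMMAS AND PROOFS =====

-- a character a component may contain: '_' or a letter
def okChar (c : Char) : Bool := c == '_' || PySem.Chars.isalpha c

-- replace node "_" "" is the underscore-free sublist
theorem replace_go_underscore : ∀ (fuel : Nat) (l acc : List Char), l.length ≤ fuel →
    PySem.Chars.replace.go ['_'] [] fuel l acc = acc.reverse ++ l.filter (fun c => !(c == '_')) := by
  intro fuel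
  induction fuel with
  | zero => intro l acc h; cases l with
    | nil => simp [PySem.Chars.replace.go]
    | cons c t => simp at h
  | succ n ih =>
    intro l acc h
    cases l with
    | nil => simp [PySem.Chars.replace.go]
    | cons c t =>
      by_cases hc : c = '_'
      · subst hc
        simp only [PySem.Chars.replace.go]
        rw [if_pos (by simp [List.isPrefixOf])]
        simp only [List.length_cons, List.length_nil, List.drop_succ_cons, List.drop_zero,
          List.reverse_nil, List.nil_append]
        rw [ih t acc (by simpa using h)]
        simp
      · simp only [PySem.Chars.replace.go]
        rw [if_neg (by simp [List.isPrefixOf]; exact fun h' => hc h'.symm)]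
        rw [ih t (c :: acc) (by simpa using h)]
        simp [beq_eq_false_iff_ne.mpr hc]

theorem replace_underscore (cs : List Char) :
    PySem.Chars.replace cs ['_'] [] = cs.filter (fun c => !(c == '_')) := by
  simp only [PySem.Chars.replace]
  rw [if_neg (by decide)]
  simpa using replace_go_underscore cs.length cs [] le_rfl

theorem pyNodeOk_eq (cs : List Char) :
    pyNodeOk cs = (cs.any PySem.Chars.isalpha && cs.all okChar) := by
  rw [pyNodeOk, replace_underscore]
  induction cs with
  | nil => decide
  | cons c t ih =>
    by_cases hc : c = '_'
    · subst hc
      simpa [PySem.Chars.strIsalpha, okChar, List.filter_cons] using ih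
    · rw [List.filter_cons, Bool.eq_iff_iff]
      simp only [beq_eq_false_iff_ne.mpr hc, Bool.not_false, if_true]
      by_cases ha : PySem.Chars.isalpha c = true
      · simp [PySem.Chars.strIsalpha, ha, okChar]
      · simp [PySem.Chars.strIsalpha, ha, okChar, hc]

theorem splitOn_go_ne_nil : ∀ (fuel : Nat) (l cur : List Char) (acc : List (List Char)),
    PySem.Chars.splitOn.go ['.'] fuel l cur acc ≠ [] := by
  intro fuel
  induction fuel with
  | zero => intro l cur acc; cases l <;> simp [PySem.Chars.splitOn.go]
  | succ n ih =>
    intro l cur acc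
    cases l with
    | nil => simp [PySem.Chars.splitOn.go]
    | cons c t =>
      simp only [PySem.Chars.splitOn.go]
      split
      · exact ih _ _ _
      · exact ih _ _ _

theorem splitOn_go_all : ∀ (fuel : Nat) (l cur : List Char) (acc : List (List Char)), l.length ≤ fuel →
    (PySem.Chars.splitOn.go ['.'] fuel l cur acc).all pyNodeOk
      = (acc.all pyNodeOk && (cur.all okChar && scanPkg l (cur.any PySem.Chars.isalpha))) := by
  intro fuel
  induction fuel with
  | zero =>
    intro l cur acc h
    cases l with
    | nil =>
      simp only [PySem.Chars.splitOn.go, scanPkg, List.append_nil, List.all_reverse, List.all_cons]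
      rw [pyNodeOk_eq, Bool.eq_iff_iff]
      simp; tauto
    | cons c t => simp at h
  | succ n ih =>
    intro l cur acc h
    cases l with
    | nil =>
      simp only [PySem.Chars.splitOn.go, scanPkg, List.all_reverse, List.all_cons]
      rw [pyNodeOk_eq, Bool.eq_iff_iff]
      simp; tauto
    | cons c t =>
      by_cases hc : c = '.'
      · subst hc
        simp only [PySem.Chars.splitOn.go]
        rw [if_pos (by simp [List.isPrefixOf])]
        rw [ih _ _ _ (by simpa using h)]
        simp only [List.all_cons, List.all_nil, List.any_nil, scanPkg]
        rw [pyNodeOk_eq, Bool.eq_iff_iff]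
        rw [show (('.' == '_') : Bool) = false by decide,
            show PySem.Chars.isalpha '.' = false by decide,
            show (('.' == '.') : Bool) = true by decide]
        simp; tauto
      · simp only [PySem.Chars.splitOn.go]
        rw [if_neg (by simp [List.isPrefixOf]; exact fun h' => hc h'.symm)]
        rw [ih _ _ _ (by simpa using h)]
        simp only [List.all_cons, List.any_cons, scanPkg]
        by_cases hu : c = '_'
        · subst hu
          rw [show PySem.Chars.isalpha '_' = false by decide, Bool.eq_iff_iff]
          simp [okChar]
        · by_cases ha : PySem.Chars.isalpha c = true
          · rw [Bool.eq_iff_iff]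
            simp [okChar, hu, ha]
            try tauto
          · rw [Bool.eq_iff_iff]
            simp [okChar, hu, ha, hc]
            try tauto

-- ===== VERDICT (by name: the statement is the Claim_ definition above) =====
theorem check_package_name_py_spec : Claim_equal_check_package_name_py := by
  intro package _
  unfold Spec_check_package_name_py check_package_name_py check_package_name_py_alt
  simp only [PySem.Chars.splitOn]
  rw [if_neg (by simp [splitOn_go_ne_nil])]
  rw [splitOn_go_all _ _ _ _ (by omega)]
  simp
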